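-- pv_equiv track=rewrite | github.com/wzygxr/shuati | class040_MeetInMiddleAndBidirectionalBFS/Code12_BeautifulQuadruples.py | count_invalid_cases
-- ===== SOURCE A (Python) =====
-- from typing import List, Dict, Tuple
--
-- def count_invalid_cases(ab_indices: List[int], cd_indices: List[int],
--                        a_len: int, b_len: int, c_len: int, d_len: int) -> int:
--     """
--     计算违反索引约束的情况数目
--
--     Args:
--         ab_indices: A,B组的索引信息（最大索引）
--         cd_indices: C,D组的索引信息（最小索引）
--         a_len, b_len, c_len, d_len: 各数组长度
--
--     Returns:
--         违反索引约束的情况数目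
--     """
--     if not ab_indices or not cd_indices:
--         return 0
--
--     # 对索引进行排序，便于统计
--     ab_indices_sorted = sorted(ab_indices)
--     cd_indices_sorted = sorted(cd_indices)
--
--     invalid_count = 0
--
--     # 使用双指针技术统计违反约束的情况
--     # 对于每个ab组合的最大索引，找到所有cd组合的最小索引小于等于该值的情况
--     cd_ptr = 0
--     cd_len = len(cd_indices_sorted)
--
--     for ab_max_index in ab_indices_sorted:
--         # 找到所有cd最小索引 <= ab_max_index 的组合
--         while cd_ptr < cd_len and cd_indices_sorted[cd_ptr] <= ab_max_index:
--             cd_ptr += 1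
--
--         # cd_ptr之前的组合都违反约束
--         invalid_count += cd_ptr
--
--     return invalid_count
-- ===== SOURCE B (Python) =====
-- def count_invalid_cases(ab_indices, cd_indices,
--                         a_len, b_len, c_len, d_len):
--     # Sort only the cd indices once; for each ab max-index x (in any order),
--     # binary-search the count of cd min-indices <= x (bisect_right) and sum.
--     cd_sorted = sorted(cd_indices)
--     total = 0
--     for x in ab_indices:
--         lo, hi = 0, len(cd_sorted)
--         while lo < hi:
--             mid = (lo + hi) // 2
--             if cd_sorted[mid] <= x:
--                 lo = mid + 1
--             else:
--                 hi = mid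
--         total += lo
--     return total
-- ===== Notes on version B (the rewrite author's own statement) =====
-- stated objective: alternative
-- what changed: Replaced A's sort-both-lists + monotone two-pointer sweep by sorting only cd_indices and, for each ab index in original order, a hand-written bisect_right binary search for the count of cd values <= it, summed directly; no second sort, no pointer state, no empty-input guard.
import Mathlib
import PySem

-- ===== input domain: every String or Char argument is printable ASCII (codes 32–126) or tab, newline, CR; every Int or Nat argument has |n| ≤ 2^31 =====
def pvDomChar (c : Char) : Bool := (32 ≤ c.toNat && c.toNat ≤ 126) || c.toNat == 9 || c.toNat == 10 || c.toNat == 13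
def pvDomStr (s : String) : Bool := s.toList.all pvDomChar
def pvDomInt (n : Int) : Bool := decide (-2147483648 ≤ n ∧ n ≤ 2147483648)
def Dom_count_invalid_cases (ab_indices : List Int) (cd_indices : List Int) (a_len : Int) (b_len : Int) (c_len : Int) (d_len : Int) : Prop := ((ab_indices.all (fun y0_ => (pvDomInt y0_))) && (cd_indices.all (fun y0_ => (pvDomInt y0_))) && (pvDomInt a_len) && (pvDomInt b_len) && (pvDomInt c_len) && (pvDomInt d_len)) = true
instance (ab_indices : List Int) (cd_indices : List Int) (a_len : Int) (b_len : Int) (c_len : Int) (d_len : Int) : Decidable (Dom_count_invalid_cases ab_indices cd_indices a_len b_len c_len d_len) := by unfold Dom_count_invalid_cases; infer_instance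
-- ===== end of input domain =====

-- B sorts only the cd list and, for each ab index in original order, binary-searches
-- (bisect_right, hand-written) the count of cd values <= it; no second sort, no pointer state,
-- no empty-input guard.

-- ===== PORT A =====
-- A's inner `while cd_ptr < cd_len and cd_indices_sorted[cd_ptr] <= ab_max_index: cd_ptr += 1`
def pvAdvance (cdS : List Int) (x : Int) (ptr : Nat) : Nat :=
  if h : ptr < cdS.length then
    if cdS[ptr] ≤ x then pvAdvance cdS x (ptr + 1) else ptr
  else ptr
termination_by cdS.length - ptr

def count_invalid_cases (ab_indices : List Int) (cd_indices : List Int) (a_len : Int) (b_len : Int) (c_len : Int) (d_len : Int) : Int :=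
  if ab_indices = [] ∨ cd_indices = [] then 0
  else
    let ab_indices_sorted := PySem.List.sorted ab_indices (fun v => v) false
    let cd_indices_sorted := PySem.List.sorted cd_indices (fun v => v) false
    -- state: (cd_ptr, invalid_count)
    (ab_indices_sorted.foldl
      (fun (st : Nat × Int) ab_max_index =>
        let p := pvAdvance cd_indices_sorted ab_max_index st.1
        (p, st.2 + (p : Int)))
      ((0 : Nat), (0 : Int))).2

-- ===== PORT B =====
-- B's hand-written bisect_right loop: `while lo < hi: mid = (lo+hi)//2; ...`.
-- `mid` is always < cd_sorted.length in B (hi starts at the length), so `getD _ 0` is exact here;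
-- the fuel argument (= hi - lo at entry, enough for every iteration) only makes the loop
-- structurally total, it never runs out.
def pvBisectLoop (cdS : List Int) (x : Int) : Nat → Nat → Nat → Nat
  | 0, lo, _ => lo
  | fuel + 1, lo, hi =>
    if lo < hi then
      let mid := (lo + hi) / 2
      if cdS.getD mid 0 ≤ x then pvBisectLoop cdS x fuel (mid + 1) hi
      else pvBisectLoop cdS x fuel lo mid
    else lo

def pvBisect (cdS : List Int) (x : Int) (lo : Nat) (hi : Nat) : Nat :=
  pvBisectLoop cdS x (hi - lo) lo hi

def count_invalid_cases_alt (ab_indices : List Int) (cd_indices : List Int) (a_len : Int) (b_len : Int) (c_len : Int) (d_len : Int) : Int :=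
  let cd_sorted := PySem.List.sorted cd_indices (fun v => v) false
  ab_indices.foldl (fun total x => total + (pvBisect cd_sorted x 0 cd_sorted.length : Int)) 0

-- ===== PRECONDITION & SPEC =====
def Spec_count_invalid_cases (ab_indices : List Int) (cd_indices : List Int) (a_len : Int) (b_len : Int) (c_len : Int) (d_len : Int) (out : Int) : Prop := out = count_invalid_cases_alt ab_indices cd_indices a_len b_len c_len d_len
instance (ab_indices : List Int) (cd_indices : List Int) (a_len : Int) (b_len : Int) (c_len : Int) (d_len : Int) (out : Int) : Decidable (Spec_count_invalid_cases ab_indices cd_indices a_len b_len c_len d_len out) := by unfold Spec_count_invalid_cases; infer_instance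

-- ===== CLAIM (what is proved, stated in full; the proofs are below) =====
def Claim_equal_count_invalid_cases : Prop := ∀ (ab_indices : List Int) (cd_indices : List Int) (a_len : Int) (b_len : Int) (c_len : Int) (d_len : Int), Dom_count_invalid_cases ab_indices cd_indices a_len b_len c_len d_len → Spec_count_invalid_cases ab_indices cd_indices a_len b_len c_len d_len (count_invalid_cases ab_indices cd_indices a_len b_len c_len d_len)

-- ===== LEMMAS AND PROOFS =====

-- In a ≤-sorted list the elements ≤ x are exactly the first `countP (· ≤ x)` ones.
theorem countP_le_pos (l : List Int) (x : Int) (hs : l.Pairwise (· ≤ ·)) :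
    ∀ j (hj : j < l.length), (j < l.countP (fun c => decide (c ≤ x)) ↔ l[j] ≤ x) := by
  induction l with
  | nil => intro j hj; simp at hj
  | cons a t ih =>
    rcases List.pairwise_cons.mp hs with ⟨ha, ht⟩
    intro j hj
    have hzt : ¬ a ≤ x → t.countP (fun c => decide (c ≤ x)) = 0 := by
      intro hax
      apply List.countP_eq_zero.mpr
      intro c hc
      have := ha c hc
      simp only [decide_eq_true_eq]
      omega
    cases j with
    | zero =>
      by_cases hax : a ≤ x
      · simp [List.countP_cons, hax]
      · simp [hax, hzt hax]
    | succ j =>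
      have hj' : j < t.length := by simpa using hj
      by_cases hax : a ≤ x
      · have hIH := ih ht j hj'
        simp [List.countP_cons, hax]
        omega
      · have hat : a ≤ t[j] := ha _ (List.getElem_mem hj')
        have hjx : ¬ t[j] ≤ x := by omega
        simp [hax, hzt hax, hjx]

-- A's while-loop lands exactly at the count of cd values ≤ x.
theorem pvAdvance_eq_countP (l : List Int) (x : Int) (ptr : Nat)
    (hs : l.Pairwise (· ≤ ·)) (hle : ptr ≤ l.countP (fun c => decide (c ≤ x))) :
    pvAdvance l x ptr = l.countP (fun c => decide (c ≤ x)) := by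
  revert hle
  induction ptr using pvAdvance.induct (cdS := l) (x := x) with
  | case1 ptr h hcx ih =>
    intro hle
    rw [pvAdvance, dif_pos h, if_pos hcx]
    apply ih
    exact (countP_le_pos l x hs ptr h).mpr hcx
  | case2 ptr h hcx =>
    intro hle
    rw [pvAdvance, dif_pos h, if_neg hcx]
    have := (countP_le_pos l x hs ptr h)
    omega
  | case3 ptr h =>
    intro hle
    rw [pvAdvance, dif_neg h]
    have : l.countP (fun c => decide (c ≤ x)) ≤ l.length := List.countP_le_length
    omega

-- Unrolling A's pointer fold to a sum of counts.
theorem foldA_eq_sum (cdS : List Int) (hs : cdS.Pairwise (· ≤ ·)) :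
    ∀ (abL : List Int) (ptr : Nat) (acc : Int),
      abL.Pairwise (· ≤ ·) →
      (∀ y ∈ abL, ptr ≤ cdS.countP (fun c => decide (c ≤ y))) →
      (abL.foldl
        (fun (st : Nat × Int) x =>
          let p := pvAdvance cdS x st.1
          (p, st.2 + (p : Int))) (ptr, acc)).2
        = acc + (abL.map (fun x => ((cdS.countP (fun c => decide (c ≤ x))) : Int))).sum := by
  intro abL
  induction abL with
  | nil => intro ptr acc _ _; simp
  | cons x t ih =>
    intro ptr acc hp hptr
    rcases List.pairwise_cons.mp hp with ⟨hxt, ht⟩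
    have hx : pvAdvance cdS x ptr = cdS.countP (fun c => decide (c ≤ x)) :=
      pvAdvance_eq_countP cdS x ptr hs (hptr x (List.mem_cons_self))
    simp only [List.foldl_cons, List.map_cons, List.sum_cons]
    rw [ih _ _ ht]
    · rw [hx]; ring
    · intro y hy
      rw [hx]
      exact List.countP_mono_left (fun c _ hc => by
        simp only [decide_eq_true_eq] at *
        exact le_trans hc (hxt y hy))

-- B's binary search also lands exactly at the count of cd values ≤ x.
theorem pvBisectLoop_eq_countP (l : List Int) (x : Int) (hs : l.Pairwise (· ≤ ·)) :
    ∀ (fuel lo hi : Nat), hi - lo ≤ fuel → hi ≤ l.length →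
      lo ≤ l.countP (fun c => decide (c ≤ x)) → l.countP (fun c => decide (c ≤ x)) ≤ hi →
      pvBisectLoop l x fuel lo hi = l.countP (fun c => decide (c ≤ x)) := by
  intro fuel
  induction fuel with
  | zero => intro lo hi hf _ hlo hhi; simp only [pvBisectLoop]; omega
  | succ fuel ih =>
    intro lo hi hf hlen hlo hhi
    simp only [pvBisectLoop]
    by_cases h : lo < hi
    · rw [if_pos h]
      have hmid : (lo + hi) / 2 < l.length := by omega
      by_cases hcx : l.getD ((lo + hi) / 2) 0 ≤ x
      · rw [if_pos hcx]
        rw [List.getD_eq_getElem l 0 hmid] at hcx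
        have : (lo + hi) / 2 < l.countP (fun c => decide (c ≤ x)) :=
          (countP_le_pos l x hs _ hmid).mpr hcx
        exact ih _ _ (by omega) hlen (by omega) hhi
      · rw [if_neg hcx]
        rw [List.getD_eq_getElem l 0 hmid] at hcx
        have : ¬ (lo + hi) / 2 < l.countP (fun c => decide (c ≤ x)) :=
          fun hc => hcx ((countP_le_pos l x hs _ hmid).mp hc)
        exact ih _ _ (by omega) (by omega) hlo (by omega)
    · rw [if_neg h]
      omega

theorem pvBisect_eq_countP (l : List Int) (x : Int)
    (hs : l.Pairwise (· ≤ ·)) :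
    pvBisect l x 0 l.length = l.countP (fun c => decide (c ≤ x)) := by
  exact pvBisectLoop_eq_countP l x hs _ 0 l.length le_rfl le_rfl (Nat.zero_le _)
    List.countP_le_length

-- ===== VERDICT (by name: the statement is the Claim_ definition above) =====
theorem count_invalid_cases_spec : Claim_equal_count_invalid_cases := by
  intro ab cd a_len b_len c_len d_len _
  unfold Spec_count_invalid_cases count_invalid_cases count_invalid_cases_alt
  set cdS := PySem.List.sorted cd (fun v => v) false with hcdS
  have hcdp : cdS.Pairwise (· ≤ ·) := PySem.List.sorted_pairwise cd (fun v => v)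
  have hbis : ∀ x : Int, (pvBisect cdS x 0 cdS.length : Int)
      = ((cd.countP (fun c => decide (c ≤ x))) : Int) := by
    intro x
    rw [pvBisect_eq_countP cdS x hcdp,
      (PySem.List.sorted_perm cd (fun v => v) false).countP_eq]
  -- B is the sum of per-element counts over the original ab list
  rw [PySem.List.foldl_add ab (fun x => (pvBisect cdS x 0 cdS.length : Int)) 0]
  have hmapB : ab.map (fun x => (pvBisect cdS x 0 cdS.length : Int))
      = ab.map (fun x => ((cd.countP (fun c => decide (c ≤ x))) : Int)) :=
    List.map_congr_left (fun x _ => hbis x)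
  rw [hmapB, zero_add]
  by_cases h : ab = [] ∨ cd = []
  · rw [if_pos h]
    rcases h with h | h
    · subst h; simp
    · subst h; simp [List.countP_nil]
  · rw [if_neg h]
    set abS := PySem.List.sorted ab (fun v => v) false with habS
    have habp : abS.Pairwise (· ≤ ·) := PySem.List.sorted_pairwise ab (fun v => v)
    rw [foldA_eq_sum cdS hcdp abS 0 0 habp (fun y _ => Nat.zero_le _)]
    have hmap : abS.map (fun x => ((cdS.countP (fun c => decide (c ≤ x))) : Int))
        = abS.map (fun x => ((cd.countP (fun c => decide (c ≤ x))) : Int)) := by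
      apply List.map_congr_left; intro x _
      rw [(PySem.List.sorted_perm cd (fun v => v) false).countP_eq]
    rw [hmap]
    have hperm : (abS.map (fun x => ((cd.countP (fun c => decide (c ≤ x))) : Int))).Perm
        (ab.map (fun x => ((cd.countP (fun c => decide (c ≤ x))) : Int))) :=
      (PySem.List.sorted_perm ab (fun v => v) false).map _
    rw [hperm.sum_eq]
    ring
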